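-- pv_equiv track=rewrite | github.com/MansoorAB/test-suite-automation | scenario_search.py | extract_scenarios
-- ===== SOURCE A (Python) =====
-- from typing import List, Dict, Any
--
-- def extract_scenarios(content: str) -> List[Dict[str, str]]:
--     """Extract individual scenarios from feature file content"""
--     scenarios = []
--     current_scenario = []
--     current_tags = ""
--
--     for line in content.split('\n'):
--         line = line.strip()
--         if line.startswith('@'):
--             current_tags = line
--         elif line.startswith('Scenario:') or line.startswith('Scenario Outline:'):
--             if current_scenario:
--                 scenarios.append({
--                     'tags': current_tags,
--                     'content': '\n'.join(current_scenario)
--                 })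
--             current_scenario = [line]
--             current_tags = ""
--         elif current_scenario and line:
--             current_scenario.append(line)
--
--     if current_scenario:
--         scenarios.append({
--             'tags': current_tags,
--             'content': '\n'.join(current_scenario)
--         })
--
--     return scenarios
-- ===== SOURCE B (Python) =====
-- def extract_scenarios(content):
--     """Extract individual scenarios from feature file content"""
--     lines = [l.strip() for l in content.split('\n')]
--     idxs = [i for i, l in enumerate(lines)
--             if l.startswith('Scenario:') or l.startswith('Scenario Outline:')]
--     scenarios = []
--     for i, j in zip(idxs, idxs[1:] + [len(lines)]):
--         seg = lines[i:j]
--         tags = ''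
--         for l in seg:
--             if l.startswith('@'):
--                 tags = l
--         body = '\n'.join(l for l in seg if l and not l.startswith('@'))
--         scenarios.append({'tags': tags, 'content': body})
--     return scenarios
-- ===== Notes on version B (the rewrite author's own statement) =====
-- stated objective: alternative
-- what changed: A's single stateful pass (scenarios/current_scenario/current_tags accumulators with flush-on-header and tag-reset bookkeeping) is replaced by an index-based decomposition: enumerate the stripped lines, collect the scenario-header indices, slice the line list into segments from one header to the next, and derive each dict's tags (last tag line in the segment, else empty) and content (joined non-empty non-tag lines) per segment.
import Mathlib
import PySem

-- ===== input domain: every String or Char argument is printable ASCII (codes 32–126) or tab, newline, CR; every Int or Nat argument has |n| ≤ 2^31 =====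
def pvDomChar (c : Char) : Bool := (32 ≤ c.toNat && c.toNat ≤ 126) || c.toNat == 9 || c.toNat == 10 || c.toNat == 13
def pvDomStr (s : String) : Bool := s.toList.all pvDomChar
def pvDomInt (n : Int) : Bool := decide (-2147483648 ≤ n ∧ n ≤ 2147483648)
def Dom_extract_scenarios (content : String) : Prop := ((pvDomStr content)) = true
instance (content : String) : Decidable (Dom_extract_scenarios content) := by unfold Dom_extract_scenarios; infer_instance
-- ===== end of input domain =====

-- B replaces A's single stateful pass (scenarios/current_scenario/current_tags accumulators with
-- flush-on-header) by an index-based decomposition: find the header positions, slice the stripped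
-- line list into segments, and derive tags/content per segment. Alternative decomposition, same cost.

-- shared helpers: the header test and the scenario dict {'tags': t, 'content': joined lines}

def pvIsHeader (l : String) : Bool :=
  PySem.Str.startswith l "Scenario:" || PySem.Str.startswith l "Scenario Outline:"

def pvScen (tags : String) (cur : List String) : List (String × String) :=
  [("tags", tags), ("content", PySem.Str.join "\n" cur)]

-- ===== PORT A =====
-- loop body of A, applied to the already-stripped line (A strips at the top of each iteration)

def pvStepCore (st : List (List (String × String)) × List String × String) (line : String) :
    List (List (String × String)) × List String × String :=
  if PySem.Str.startswith line "@" then (st.1, st.2.1, line)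
  else if pvIsHeader line then
    ((if st.2.1.isEmpty then st.1 else st.1 ++ [pvScen st.2.2 st.2.1]), [line], "")
  else if !st.2.1.isEmpty && !(line == "") then (st.1, st.2.1 ++ [line], st.2.2)
  else st

def pvStepA (st : List (List (String × String)) × List String × String) (raw : String) :
    List (List (String × String)) × List String × String :=
  pvStepCore st (PySem.Str.strip raw)

def extract_scenarios (content : String) : List (List (String × String)) :=
  let st := ((PySem.Str.split? content "\n").getD []).foldl pvStepA ([], [], "")
  if st.2.1.isEmpty then st.1 else st.1 ++ [pvScen st.2.2 st.2.1]

-- ===== PORT B =====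
-- per-segment postprocessing: tags = last '@' line of the segment, content = joined kept lines

def pvTag (t l : String) : String := if PySem.Str.startswith l "@" then l else t

def pvKeep (l : String) : Bool := !(l == "") && !PySem.Str.startswith l "@"

def pvSegScen (seg : List String) : List (String × String) :=
  pvScen (seg.foldl pvTag "") (seg.filter pvKeep)

def extract_scenarios_alt (content : String) : List (List (String × String)) :=
  let lines := ((PySem.Str.split? content "\n").getD []).map PySem.Str.strip
  let idxs := ((PySem.List.enumerate lines).filter (fun p => pvIsHeader p.2)).map Prod.fst
  (idxs.zip (PySem.List.slice idxs (some 1) none ++ [(lines.length : Int)])).map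
    (fun p => pvSegScen (PySem.List.slice lines (some p.1) (some p.2)))

-- ===== PRECONDITION & SPEC =====
def Spec_extract_scenarios (content : String) (out : List (List (String × String))) : Prop := out = extract_scenarios_alt content
instance (content : String) (out : List (List (String × String))) : Decidable (Spec_extract_scenarios content out) := by unfold Spec_extract_scenarios; infer_instance

-- ===== CLAIM (what is proved, stated in full; the proofs are below) =====
def Claim_equal_extract_scenarios : Prop := ∀ (content : String), Dom_extract_scenarios content → Spec_extract_scenarios content (extract_scenarios content)

-- ===== LEMMAS AND PROOFS =====
-- intermediate specs: A's fold is characterised by pvLead/pvProc, B's index/slice pipeline by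
-- pvBcore, and both are shown equal to mapping pvSegScen over the recursive segmentation pvSegsOf.

def pvProc : List String → String → List String → List (List (String × String))
  | [], tags, cur => [pvScen tags cur]
  | l :: ls, tags, cur =>
    if PySem.Str.startswith l "@" then pvProc ls l cur
    else if pvIsHeader l then pvScen tags cur :: pvProc ls "" [l]
    else if !(l == "") then pvProc ls tags (cur ++ [l]) else pvProc ls tags cur

def pvLead : List String → List (List (String × String))
  | [] => []
  | l :: ls => if pvIsHeader l then pvProc ls "" [l] else pvLead ls

def pvFinish (st : List (List (String × String)) × List String × String) :
    List (List (String × String)) :=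
  if st.2.1.isEmpty then st.1 else st.1 ++ [pvScen st.2.2 st.2.1]

def pvSegsOf : List String → List (List String)
  | [] => []
  | l :: ls =>
    if pvIsHeader l then
      (l :: ls.takeWhile (fun x => !pvIsHeader x)) :: pvSegsOf (ls.dropWhile (fun x => !pvIsHeader x))
    else pvSegsOf ls
termination_by ls => ls.length
decreasing_by
  · have := List.length_dropWhile_le (fun x => !pvIsHeader x) ls; simp; omega
  · simp

theorem pvSegsOf_nil : pvSegsOf [] = [] := by rw [pvSegsOf.eq_def]

theorem pvSegsOf_cons (l : String) (ls : List String) :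
    pvSegsOf (l :: ls) =
      if pvIsHeader l then
        (l :: ls.takeWhile (fun x => !pvIsHeader x)) ::
          pvSegsOf (ls.dropWhile (fun x => !pvIsHeader x))
      else pvSegsOf ls := by
  rw [pvSegsOf.eq_def]

theorem pv_hdr_S (l : String) (h : pvIsHeader l = true) : ∃ r, l.toList = 'S' :: r := by
  simp [pvIsHeader, PySem.Str.startswith_eq, PySem.Chars.startswith_iff] at h
  rcases h with h | h <;>
  · obtain ⟨t, ht⟩ := h
    exact ⟨_, by rw [← ht]; rfl⟩

theorem pv_hdr_not_at (l : String) (h : pvIsHeader l = true) :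
    PySem.Str.startswith l "@" = false := by
  obtain ⟨r, hr⟩ := pv_hdr_S l h
  simp [PySem.Str.startswith_eq, hr, PySem.Chars.startswith, List.isPrefixOf]

theorem pv_at_not_hdr (l : String) (h : PySem.Str.startswith l "@" = true) :
    pvIsHeader l = false := by
  rw [PySem.Str.startswith_eq, PySem.Chars.startswith_iff] at h
  obtain ⟨t, ht⟩ := h
  have hr : l.toList = '@' :: t := by rw [← ht]; rfl
  simp [pvIsHeader, PySem.Str.startswith_eq, hr, PySem.Chars.startswith, List.isPrefixOf]

theorem pv_hdr_keep (l : String) (h : pvIsHeader l = true) : pvKeep l = true := by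
  obtain ⟨r, hr⟩ := pv_hdr_S l h
  have hne : l ≠ "" := by intro e; rw [e] at hr; simp at hr
  simp [pvKeep, hne]
  simp [hr, PySem.Chars.startswith, List.isPrefixOf]

theorem pv_empty_not_hdr : pvIsHeader "" = false := by decide

theorem pv_foldl_proc (ls : List String) :
    ∀ scens cur tags, cur ≠ [] →
      pvFinish (ls.foldl pvStepCore (scens, cur, tags)) = scens ++ pvProc ls tags cur := by
  induction ls with
  | nil =>
    intro scens cur tags hcur
    have h : cur.isEmpty = false := by simp [List.isEmpty_iff, hcur]
    simp [pvFinish, pvProc, h]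
  | cons l ls ih =>
    intro scens cur tags hcur
    have h : cur.isEmpty = false := by simp [List.isEmpty_iff, hcur]
    rw [pvProc]
    simp only [List.foldl_cons, pvStepCore, h, Bool.not_false, Bool.true_and,
      Bool.false_eq_true, if_false]
    split_ifs with h1 h2 h3
    · exact ih _ _ _ hcur
    · rw [ih _ [l] "" (by simp)]; simp
    · rw [ih _ (cur ++ [l]) tags (by simp)]
    · exact ih _ _ _ hcur

theorem pv_foldl_lead (ls : List String) :
    ∀ tags, pvFinish (ls.foldl pvStepCore ([], [], tags)) = pvLead ls := by
  induction ls with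
  | nil => intro tags; simp [pvFinish, pvLead]
  | cons l ls ih =>
    intro tags
    rw [pvLead]
    simp only [List.foldl_cons, pvStepCore, List.isEmpty_nil, Bool.not_true, Bool.false_and,
      Bool.false_eq_true, if_false, if_true]
    split_ifs with h1 h2
    · rw [pv_at_not_hdr l (by simpa using h1)] at h2; exact absurd h2 (by simp)
    · exact ih l
    · rw [pv_foldl_proc ls [] [l] "" (by simp)]; simp
    · exact ih tags

theorem pv_proc_seg (ls : List String) :
    ∀ tags cur,
      pvProc ls tags cur =
        pvScen ((ls.takeWhile (fun x => !pvIsHeader x)).foldl pvTag tags)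
          (cur ++ (ls.takeWhile (fun x => !pvIsHeader x)).filter pvKeep) ::
        (pvSegsOf (ls.dropWhile (fun x => !pvIsHeader x))).map pvSegScen := by
  induction ls with
  | nil => intro tags cur; simp [pvProc, pvSegsOf_nil]
  | cons l ls ih =>
    intro tags cur
    rw [pvProc]
    split_ifs with h1 h2 h3
    · -- '@' line: not a header, not kept, becomes the running tag
      have hh : pvIsHeader l = false := pv_at_not_hdr l (by simpa using h1)
      have h1' : PySem.Chars.startswith l.toList ['@'] = true := by simpa using h1
      have hk : pvKeep l = false := by simp [pvKeep]; intro _; simpa using h1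
      simp only [List.takeWhile_cons, List.dropWhile_cons, hh, Bool.not_false, if_true,
        List.foldl_cons, List.filter_cons, hk]
      rw [ih]
      simp [pvTag, h1']
    · -- header line: segment boundary
      have hat : PySem.Str.startswith l "@" = false := pv_hdr_not_at l h2
      have hat' : PySem.Chars.startswith l.toList ['@'] = false := by simpa using hat
      simp only [List.takeWhile_cons, List.dropWhile_cons, h2, Bool.not_true,
        Bool.false_eq_true, if_false, List.takeWhile_nil, List.foldl_nil, List.filter_nil,
        List.append_nil]
      rw [pvSegsOf_cons]
      simp only [h2, if_true, List.map_cons]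
      rw [ih "" [l]]
      simp only [pvSegScen, pvScen, List.foldl_cons, List.filter_cons, pv_hdr_keep l h2,
        pvTag, hat', Bool.false_eq_true, if_false, List.singleton_append]
      simp [hat']
    · -- plain nonempty line: kept, tag unchanged
      have hh : pvIsHeader l = false := by simpa using h2
      have h1' : PySem.Chars.startswith l.toList ['@'] = false := by
        simpa using (by simpa using h1 : PySem.Str.startswith l "@" = false)
      have hk : pvKeep l = true := by simp [pvKeep]; exact ⟨by simpa using h3, by simpa using h1⟩
      simp only [List.takeWhile_cons, List.dropWhile_cons, hh, Bool.not_false, if_true,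
        List.foldl_cons, List.filter_cons, hk]
      rw [ih]
      simp [pvTag, h1']
    · -- blank line: dropped
      have hl : l = "" := by simpa using h3
      subst hl
      have hk : pvKeep "" = false := by decide
      simp only [List.takeWhile_cons, List.dropWhile_cons, pv_empty_not_hdr, Bool.not_false,
        if_true, List.foldl_cons, List.filter_cons, hk]
      rw [ih]
      have : pvTag tags "" = tags := by
        simp [pvTag]
        intro h; exact absurd h (by decide)
      simp [this]

theorem pv_lead_seg (ls : List String) : pvLead ls = (pvSegsOf ls).map pvSegScen := by
  induction ls with
  | nil => simp [pvLead, pvSegsOf_nil]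
  | cons l ls ih =>
    rw [pvLead, pvSegsOf_cons]
    split_ifs with h
    · rw [pv_proc_seg]
      simp only [List.map_cons]
      congr 1
      simp only [pvSegScen, pvScen, List.foldl_cons, List.filter_cons, pv_hdr_keep l h,
        pvTag, Bool.false_eq_true, if_false, List.singleton_append]
      have hat' : PySem.Chars.startswith l.toList ['@'] = false := by
        simpa using pv_hdr_not_at l h
      simp [hat']
    · exact ih

def pvIdxs (ls : List String) (s : Int) : List Int :=
  ((PySem.List.enumerate ls s).filter (fun p => pvIsHeader p.2)).map Prod.fst

def pvBcore (ls : List String) : List (List (String × String)) :=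
  ((pvIdxs ls 0).zip ((pvIdxs ls 0).drop 1 ++ [(ls.length : Int)])).map
    (fun p => pvSegScen (PySem.List.slice ls (some p.1) (some p.2)))

theorem pv_idxs_cons (l : String) (ls : List String) (s : Int) :
    pvIdxs (l :: ls) s = if pvIsHeader l then s :: pvIdxs ls (s + 1) else pvIdxs ls (s + 1) := by
  simp only [pvIdxs, PySem.List.enumerate_cons, List.filter_cons]
  split_ifs with h <;> simp_all

theorem pv_idxs_shift (ls : List String) : ∀ s, pvIdxs ls (s + 1) = (pvIdxs ls s).map (· + 1) := by
  induction ls with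
  | nil => intro s; simp [pvIdxs, PySem.List.enumerate]
  | cons l ls ih =>
    intro s
    rw [pv_idxs_cons, pv_idxs_cons]
    split_ifs with h <;> simp [ih]

theorem pv_idxs_nonneg (ls : List String) : ∀ s i, i ∈ pvIdxs ls s → s ≤ i := by
  induction ls with
  | nil => intro s i h; simp [pvIdxs, PySem.List.enumerate] at h
  | cons l ls ih =>
    intro s i h
    rw [pv_idxs_cons] at h
    split_ifs at h with hh
    · rcases List.mem_cons.mp h with rfl | h
      · omega
      · have := ih (s + 1) i h; omega
    · have := ih (s + 1) i h; omega

theorem pv_slice_cons_succ {α : Type} (x : α) (xs : List α) (i j : Int) (hi : 0 ≤ i) (hj : 0 ≤ j) :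
    PySem.List.slice (x :: xs) (some (i + 1)) (some (j + 1)) = PySem.List.slice xs (some i) (some j) := by
  rw [PySem.List.slice_toNat _ (by omega) (by omega), PySem.List.slice_toNat _ hi hj]
  have h1 : (i + 1).toNat = i.toNat + 1 := by omega
  have h2 : (j + 1).toNat = j.toNat + 1 := by omega
  rw [h1, h2, List.drop_succ_cons]
  congr 1
  omega

theorem pv_shift (I : List Int) (n : Int) (x : String) (xs : List String)
    (hI : ∀ i ∈ I, 0 ≤ i) (hn : 0 ≤ n) :
    ((I.map (· + 1)).zip ((I.map (· + 1)).drop 1 ++ [n + 1])).map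
      (fun p => pvSegScen (PySem.List.slice (x :: xs) (some p.1) (some p.2))) =
    (I.zip (I.drop 1 ++ [n])).map
      (fun p => pvSegScen (PySem.List.slice xs (some p.1) (some p.2))) := by
  have e1 : (I.map (· + 1)).drop 1 ++ [n + 1] = (I.drop 1 ++ [n]).map (· + 1) := by
    simp [← List.map_drop]
  rw [e1, List.zip_map, List.map_map]
  apply List.map_congr_left
  intro p hp
  obtain ⟨hp1, hp2⟩ := List.of_mem_zip hp
  have hi : 0 ≤ p.1 := hI _ hp1
  have hj : 0 ≤ p.2 := by
    rcases List.mem_append.mp hp2 with h | h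
    · exact hI _ (List.mem_of_mem_drop h)
    · simp at h; omega
  simp only [Function.comp, Prod.map]
  exact congrArg pvSegScen (pv_slice_cons_succ x xs p.1 p.2 hi hj)

theorem pv_idxs_nil_takeWhile (ls : List String) :
    ∀ s, pvIdxs ls s = [] → ls.takeWhile (fun x => !pvIsHeader x) = ls := by
  induction ls with
  | nil => intro s _; simp
  | cons l ls ih =>
    intro s h
    rw [pv_idxs_cons] at h
    by_cases hh : pvIsHeader l = true
    · rw [if_pos hh] at h; exact absurd h (by simp)
    · rw [if_neg hh] at h
      simp only [Bool.not_eq_true] at hh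
      simp [List.takeWhile_cons, hh, ih _ h]

theorem pv_idxs_first (ls : List String) :
    ∀ i I', pvIdxs ls 0 = i :: I' →
      0 ≤ i ∧ ls.take i.toNat = ls.takeWhile (fun x => !pvIsHeader x) := by
  induction ls with
  | nil => intro i I' h; simp [pvIdxs, PySem.List.enumerate] at h
  | cons l ls ih =>
    intro i I' h
    rw [pv_idxs_cons] at h
    by_cases hh : pvIsHeader l = true
    · rw [if_pos hh] at h
      obtain ⟨rfl, _⟩ := List.cons_eq_cons.mp h
      simp [List.takeWhile_cons, hh]
    · rw [if_neg hh] at h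
      rw [pv_idxs_shift] at h
      obtain ⟨i0, I0, e, rfl, rfl⟩ :
          ∃ i0 I0, pvIdxs ls 0 = i0 :: I0 ∧ i = i0 + 1 ∧ I' = I0.map (· + 1) := by
        cases e : pvIdxs ls 0 with
        | nil => rw [e] at h; simp at h
        | cons a as => rw [e] at h; simp at h; exact ⟨a, as, rfl, h.1.symm, h.2.symm⟩
      obtain ⟨h0, ht⟩ := ih _ _ e
      refine ⟨by omega, ?_⟩
      have h1 : (i0 + 1).toNat = i0.toNat + 1 := by omega
      simp only [Bool.not_eq_true] at hh
      rw [h1, List.take_succ_cons, List.takeWhile_cons, hh]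
      simp [ht]

theorem pv_bcore_cons_skip (l : String) (ls : List String) (h : pvIsHeader l = false) :
    pvBcore (l :: ls) = pvBcore ls := by
  unfold pvBcore
  rw [pv_idxs_cons, if_neg (by simp [h]), pv_idxs_shift]
  have e : ((l :: ls).length : Int) = (ls.length : Int) + 1 := by simp [List.length_cons]
  rw [e]
  exact pv_shift _ _ l ls (fun i hi => pv_idxs_nonneg ls 0 i hi) (by positivity)

theorem pv_bcore_cons_hdr (l : String) (ls : List String) (h : pvIsHeader l = true) :
    pvBcore (l :: ls) = pvSegScen (l :: ls.takeWhile (fun x => !pvIsHeader x)) :: pvBcore ls := by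
  unfold pvBcore
  rw [pv_idxs_cons, if_pos h, pv_idxs_shift]
  have e : ((l :: ls).length : Int) = (ls.length : Int) + 1 := by simp [List.length_cons]
  rw [e]
  cases eI : pvIdxs ls 0 with
  | nil =>
    have ht : ls.takeWhile (fun x => !pvIsHeader x) = ls := pv_idxs_nil_takeWhile ls 0 eI
    simp only [eI, List.map_nil, List.drop_succ_cons, List.drop_nil, List.nil_append,
      List.zip_cons_cons, List.zip_nil_right, List.map_cons, List.map_nil]
    rw [ht]
    congr 1
    rw [PySem.List.slice_toNat _ (by omega) (by positivity)]
    simp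
  | cons i I' =>
    have hi : 0 ≤ i := by
      have := pv_idxs_nonneg ls 0 i (by rw [eI]; exact List.mem_cons_self)
      omega
    have hfirst := (pv_idxs_first ls i I' eI).2
    simp only [List.map_cons, List.drop_succ_cons, List.drop_zero, List.cons_append]
    rw [List.zip_cons_cons, List.map_cons]
    congr 1
    · -- head segment: lines[0 : i+1] = l :: takeWhile
      congr 1
      rw [PySem.List.slice_toNat _ (by omega) (by omega)]
      have h1 : (i + 1).toNat = i.toNat + 1 := by omega
      simp only [Int.toNat_zero, List.drop_zero, Nat.sub_zero, h1, List.take_succ_cons]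
      rw [hfirst]
    · -- remaining segments: shift by one
      have hs := pv_shift (i :: I') (ls.length : Int) l ls
        (fun x hx => by rw [← eI] at hx; exact pv_idxs_nonneg ls 0 x hx) (by positivity)
      simpa using hs

theorem pv_segs_dropWhile (ls : List String) :
    pvSegsOf (ls.dropWhile (fun x => !pvIsHeader x)) = pvSegsOf ls := by
  induction ls with
  | nil => simp
  | cons l ls ih =>
    by_cases h : pvIsHeader l = true
    · simp [List.dropWhile_cons, h]
    · simp only [Bool.not_eq_true] at h
      rw [List.dropWhile_cons]
      simp only [h, Bool.not_false, if_true]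
      rw [ih, pvSegsOf_cons]
      simp [h]

theorem pv_bcore_seg (ls : List String) : pvBcore ls = (pvSegsOf ls).map pvSegScen := by
  induction ls with
  | nil => simp [pvBcore, pvIdxs, PySem.List.enumerate, pvSegsOf_nil]
  | cons l ls ih =>
    by_cases h : pvIsHeader l = true
    · rw [pv_bcore_cons_hdr l ls h, ih, pvSegsOf_cons, if_pos h, List.map_cons,
        pv_segs_dropWhile]
    · rw [pv_bcore_cons_skip l ls (by simpa using h), ih, pvSegsOf_cons, if_neg h]

theorem pv_alt_eq_bcore (content : String) :
    extract_scenarios_alt content =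
      pvBcore (((PySem.Str.split? content "\n").getD []).map PySem.Str.strip) := by
  unfold extract_scenarios_alt pvBcore pvIdxs
  simp only [PySem.List.slice_from_one, List.drop_one]

-- ===== VERDICT (by name: the statement is the Claim_ definition above) =====
theorem extract_scenarios_spec : Claim_equal_extract_scenarios := by
  intro content _
  show extract_scenarios content = extract_scenarios_alt content
  rw [pv_alt_eq_bcore, pv_bcore_seg, ← pv_lead_seg]
  have h1 : extract_scenarios content =
      pvFinish (((PySem.Str.split? content "\n").getD []).foldl pvStepA ([], [], "")) := rfl
  have h2 : (((PySem.Str.split? content "\n").getD []).foldl pvStepA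
      (([], [], "") : List (List (String × String)) × List String × String)) =
      ((((PySem.Str.split? content "\n").getD []).map PySem.Str.strip).foldl pvStepCore ([], [], "")) := by
    rw [List.foldl_map]
    rfl
  rw [h1, h2, pv_foldl_lead]
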